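-- pv_equiv track=rewrite | github.com/Afonso-2403/advent-of-code | 2024/code/day_7_bridge_repair.py | eivind_solution
-- ===== SOURCE A (Python) =====
-- def eivind_solution(nums, test):
--     if len(nums) == 0:
--         return set()
--     if len(nums) == 1:
--         return {nums[0]}
--
--     rest = nums[0:-1]
--     n = nums[-1]
--     r = eivind_solution(rest, test)
--     r = {c for c in r if c <= test}
--     return {n * c for c in r}.union({n + c for c in r})
-- ===== SOURCE B (Python) =====
-- def eivind_solution(nums, test):
--     # Iterative forward pass: maintain the reachable-value set, pruning before each combine.
--     if not nums:
--         return set()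
--     acc = {nums[0]}
--     for n in nums[1:]:
--         acc = {c for c in acc if c <= test}
--         acc = {n * c for c in acc} | {n + c for c in acc}
--     return acc
-- ===== Notes on version B (the rewrite author's own statement) =====
-- stated objective: simpler
-- what changed: Replaces the recursion on nums[:-1] (building a call stack of depth len(nums)) by a single forward loop that maintains the reachable-value set as an accumulator, pruning it before each combine step.
import Mathlib
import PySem

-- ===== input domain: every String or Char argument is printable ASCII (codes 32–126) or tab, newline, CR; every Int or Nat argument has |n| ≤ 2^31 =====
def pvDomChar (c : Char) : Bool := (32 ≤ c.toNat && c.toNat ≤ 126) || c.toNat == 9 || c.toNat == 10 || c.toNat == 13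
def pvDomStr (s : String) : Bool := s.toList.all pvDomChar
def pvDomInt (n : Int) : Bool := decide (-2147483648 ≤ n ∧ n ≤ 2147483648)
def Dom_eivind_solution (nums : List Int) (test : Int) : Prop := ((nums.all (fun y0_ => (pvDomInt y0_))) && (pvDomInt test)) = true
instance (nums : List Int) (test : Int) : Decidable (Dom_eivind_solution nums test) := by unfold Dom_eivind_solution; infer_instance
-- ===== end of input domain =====

-- B replaces A's recursion on nums[:-1] by a single forward loop over nums[1:] maintaining
-- the reachable-value set as an accumulator (objective: simpler, no recursion stack).

-- ===== PORT A =====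
-- Literal port of A: recursion on nums[0:-1], combining with the last element.
def eivind_solution (nums : List Int) (test : Int) : List Int :=
  if nums.length = 0 then []
  else if nums.length = 1 then [PySem.List.pyGetD nums 0 0]
  else
    let rest := PySem.List.slice nums (some 0) (some (-1))
    let n := PySem.List.pyGetD nums (-1) 0
    let r := eivind_solution rest test
    let r2 := r.filter (fun c => decide (c ≤ test))
    PySem.Set.union (PySem.Set.ofList (r2.map (fun c => n * c))) (r2.map (fun c => n + c))
termination_by nums.length
decreasing_by
  simp only [PySem.List.slice_zero_start, PySem.List.slice_to_neg_one,
    List.length_dropLast]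
  omega

-- ===== PORT B =====
-- Port of Source B: a foldl over nums[1:], pruning the accumulator before each combine.
def eivind_solution_alt (nums : List Int) (test : Int) : List Int :=
  match nums with
  | [] => []
  | x :: rest =>
    rest.foldl
      (fun acc n =>
        let p := acc.filter (fun c => decide (c ≤ test))
        PySem.Set.union (PySem.Set.ofList (p.map (fun c => n * c))) (p.map (fun c => n + c)))
      [x]

-- ===== PRECONDITION & SPEC =====
def Spec_eivind_solution (nums : List Int) (test : Int) (out : List Int) : Prop := out = eivind_solution_alt nums test
instance (nums : List Int) (test : Int) (out : List Int) : Decidable (Spec_eivind_solution nums test out) := by unfold Spec_eivind_solution; infer_instance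

-- ===== CLAIM (what is proved, stated in full; the proofs are below) =====
def Claim_equal_eivind_solution : Prop := ∀ (nums : List Int) (test : Int), Dom_eivind_solution nums test → Spec_eivind_solution nums test (eivind_solution nums test)

-- ===== LEMMAS AND PROOFS =====

-- the step both ports share (A applies it via recursion on the init, B via foldl)
def pvStep (test : Int) (acc : List Int) (n : Int) : List Int :=
  let p := acc.filter (fun c => decide (c ≤ test))
  PySem.Set.union (PySem.Set.ofList (p.map (fun c => n * c))) (p.map (fun c => n + c))

theorem eivind_append (x : Int) (l : List Int) (n test : Int) :
    eivind_solution (x :: l ++ [n]) test = pvStep test (eivind_solution (x :: l) test) n := by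
  rw [eivind_solution]
  have hlen : (x :: l ++ [n]).length ≠ 1 := by simp
  simp only [if_false, hlen, PySem.List.slice_zero_start, PySem.List.slice_to_neg_one]
  have h1 : (x :: l ++ [n]).dropLast = x :: l := by
    simpa using List.dropLast_concat (l₁ := x :: l) (b := n)
  have h2 : PySem.List.pyGetD (x :: l ++ [n]) (-1) 0 = n := by
    simpa using PySem.List.pyGetD_neg_one_append_singleton (xs := x :: l) (x := n) (d := 0)
  rw [h1, h2]
  rfl

theorem eivind_cons_eq_foldl (x : Int) (l : List Int) (test : Int) :
    eivind_solution (x :: l) test = l.foldl (pvStep test) [x] := by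
  induction l using List.reverseRecOn with
  | nil => rw [eivind_solution]; rfl
  | append_singleton l n ih =>
    rw [show x :: (l ++ [n]) = x :: l ++ [n] from rfl, eivind_append, ih,
      List.foldl_append]
    rfl

-- ===== VERDICT (by name: the statement is the Claim_ definition above) =====
theorem eivind_solution_spec : Claim_equal_eivind_solution := by
  intro nums test _
  unfold Spec_eivind_solution
  cases nums with
  | nil => rw [eivind_solution]; rfl
  | cons x l =>
    rw [eivind_cons_eq_foldl]
    rfl
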